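-- pv_equiv track=rewrite | github.com/alex-uni-due/cdpr_recovery | evaluation/eval_funcs.py | find_not_rising_index
-- ===== SOURCE A (Python) =====
-- def find_not_rising_index(signal):
--     idx = len(signal)
--     is_rising = True
--     for i, value in enumerate(signal):
--         if i==0:
--             continue
--         if value==signal[i-1]:
--             continue
--         if is_rising:
--             if (value-signal[i-1])<0:
--                 is_rising = False
--                 idx = i
--         elif (value-signal[i-1])>0:
--             is_rising = True
--             idx = i
--     return idx
-- ===== SOURCE B (Python) =====
-- def find_not_rising_index(sig):
--     n = len(sig)
--     diffs = [(i, 1 if sig[i] > sig[i - 1] else -1)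
--              for i in range(1, n) if sig[i] != sig[i - 1]]
--     prevs = [1] + [s for _, s in diffs]
--     flips = [i for (i, s), p in zip(diffs, prevs) if s != p]
--     return flips[-1] if flips else n
-- ===== Notes on version B (the rewrite author's own statement) =====
-- stated objective: alternative
-- what changed: A's single-pass up/down state machine is replaced by a two-pass pipeline: first collect the (index, sign) pairs of all nonzero consecutive differences, then return the rightmost index whose sign differs from the preceding sign (virtual initial sign +1), defaulting to len(signal).
import Mathlib
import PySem

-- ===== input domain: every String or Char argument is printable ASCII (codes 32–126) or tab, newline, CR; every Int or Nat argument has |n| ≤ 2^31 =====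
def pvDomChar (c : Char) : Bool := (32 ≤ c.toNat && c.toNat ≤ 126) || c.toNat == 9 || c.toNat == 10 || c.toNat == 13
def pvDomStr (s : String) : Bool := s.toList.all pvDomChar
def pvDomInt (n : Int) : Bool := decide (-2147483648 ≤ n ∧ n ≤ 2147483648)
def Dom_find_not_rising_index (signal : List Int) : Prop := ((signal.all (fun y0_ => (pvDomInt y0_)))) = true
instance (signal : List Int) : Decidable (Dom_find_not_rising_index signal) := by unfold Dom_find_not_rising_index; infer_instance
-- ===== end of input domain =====

-- B replaces A's in-loop up/down state machine by a two-pass pipeline: first collect the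
-- nonzero signed differences, then find the rightmost sign flip in that reduced list
-- (objective: alternative decomposition, same asymptotic cost).


-- ===== PORT A =====
-- the body of A's for-loop, as a fold step (st = (idx, is_rising), p = (i, value))
def pvStepA (signal : List Int) (st : Int × Bool) (p : Int × Int) : Int × Bool :=
  let i := p.1
  let value := p.2
  if i = 0 then st
  else
    let prev := (PySem.List.pyGet? signal (i - 1)).getD 0  -- signal[i-1]; i ≥ 1 here, so in range
    if value = prev then st
    else if st.2 then
      (if value - prev < 0 then (i, false) else st)
    else if value - prev > 0 then (i, true) else st

def find_not_rising_index (signal : List Int) : Int :=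
  ((PySem.List.enumerate signal 0).foldl (pvStepA signal) ((signal.length : Int), true)).1

-- ===== PORT B =====
-- the body of B's first comprehension: the (index, sign) pair at i, or none if equal
def pvDiffB (signal : List Int) (i : Int) : Option (Int × Int) :=
  let v := (PySem.List.pyGet? signal i).getD 0        -- signal[i]; 1 ≤ i < len, so in range
  let w := (PySem.List.pyGet? signal (i - 1)).getD 0  -- signal[i-1]
  if v ≠ w then some (i, if v > w then 1 else -1) else none

def find_not_rising_index_alt (signal : List Int) : Int :=
  let n : Int := signal.length
  let diffs : List (Int × Int) := (PySem.List.pyRange 1 n 1).filterMap (pvDiffB signal)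
  let prevs : List Int := 1 :: diffs.map (·.2)
  let flips : List Int := (diffs.zip prevs).filterMap (fun q =>
    if q.1.2 ≠ q.2 then some q.1.1 else none)
  match flips.getLast? with
  | some x => x
  | none => n

-- ===== PRECONDITION & SPEC =====
def Spec_find_not_rising_index (signal : List Int) (out : Int) : Prop := out = find_not_rising_index_alt signal
instance (signal : List Int) (out : Int) : Decidable (Spec_find_not_rising_index signal out) := by unfold Spec_find_not_rising_index; infer_instance

-- ===== CLAIM (what is proved, stated in full; the proofs are below) =====
def Claim_equal_find_not_rising_index : Prop := ∀ (signal : List Int), Dom_find_not_rising_index signal → Spec_find_not_rising_index signal (find_not_rising_index signal)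

-- ===== LEMMAS AND PROOFS =====

-- Structural (index, sign-of-diff) pairs of `rest`, with previous value `prev`, next index `i`.
def pvDiffs (prev : Int) (i : Int) : List Int → List (Int × Int)
  | [] => []
  | v :: t => if v = prev then pvDiffs v (i + 1) t
              else (i, if v > prev then 1 else -1) :: pvDiffs v (i + 1) t

-- A's state machine, run over the reduced diff list.
def pvSM : List (Int × Int) → Int → Bool → Int
  | [], idx, _ => idx
  | (i, s) :: t, idx, true => if s < 0 then pvSM t i false else pvSM t idx true
  | (i, s) :: t, idx, false => if s > 0 then pvSM t i true else pvSM t idx false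

-- B's rightmost-flip computation over the reduced diff list with previous sign p.
def pvLastFlip (l : List (Int × Int)) (p : Int) (idx : Int) : Int :=
  (((l.zip (p :: l.map (·.2))).filterMap (fun q =>
    if q.1.2 ≠ q.2 then some q.1.1 else none)).getLast?).getD idx

theorem pvDiffs_signs (rest : List Int) : ∀ (prev i : Int), ∀ q ∈ pvDiffs prev i rest, q.2 = 1 ∨ q.2 = -1 := by
  induction rest with
  | nil => intro prev i q hq; simp [pvDiffs] at hq
  | cons v t ih =>
    intro prev i q hq
    simp only [pvDiffs] at hq
    split at hq
    · exact ih v (i + 1) q hq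
    · rcases List.mem_cons.mp hq with hq | hq
      · subst hq; split <;> simp
      · exact ih v (i + 1) q hq

theorem getLast?_cons_getD (xs : List Int) (a b : Int) :
    ((a :: xs).getLast?).getD b = (xs.getLast?).getD a := by
  cases xs with
  | nil => rfl
  | cons x t =>
    rw [List.getLast?_cons_cons]
    have h : ((x :: t).getLast?).isSome := by simp
    obtain ⟨y, hy⟩ := Option.isSome_iff_exists.mp h
    simp [hy]

theorem pvLastFlip_cons_flip (i s p idx : Int) (t : List (Int × Int)) (h : s ≠ p) :
    pvLastFlip ((i, s) :: t) p idx = pvLastFlip t s i := by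
  unfold pvLastFlip
  simp only [List.map_cons, List.zip_cons_cons, List.filterMap_cons]
  rw [if_pos h]
  exact getLast?_cons_getD _ _ _

theorem pvLastFlip_cons_noflip (i s p idx : Int) (t : List (Int × Int)) (h : s = p) :
    pvLastFlip ((i, s) :: t) p idx = pvLastFlip t s idx := by
  unfold pvLastFlip
  simp only [List.map_cons, List.zip_cons_cons, List.filterMap_cons]
  rw [if_neg (by simp [h])]

-- core: the state machine equals the rightmost-flip computation
theorem pvSM_eq_lastFlip (l : List (Int × Int)) :
    ∀ (idx : Int) (r : Bool), (∀ q ∈ l, q.2 = 1 ∨ q.2 = -1) →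
      pvSM l idx r = pvLastFlip l (if r then 1 else -1) idx := by
  induction l with
  | nil => intro idx r _; cases r <;> simp [pvSM, pvLastFlip]
  | cons q t ih =>
    intro idx r hs
    obtain ⟨i, s⟩ := q
    have htail : ∀ q ∈ t, q.2 = 1 ∨ q.2 = -1 := fun q hq => hs q (by simp [hq])
    rcases hs (i, s) (by simp) with hsign | hsign <;> subst hsign <;> cases r
    · -- s = 1, r = false : flip
      simp only [pvSM, if_pos (by norm_num : (1:Int) > 0)]
      rw [ih i true htail]
      norm_num
      exact (pvLastFlip_cons_flip i 1 (-1) idx t (by norm_num)).symm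
    · -- s = 1, r = true : no flip
      simp only [pvSM, if_neg (by norm_num : ¬ (1:Int) < 0)]
      rw [ih idx true htail]
      norm_num
      exact (pvLastFlip_cons_noflip i 1 1 idx t rfl).symm
    · -- s = -1, r = false : no flip
      simp only [pvSM, if_neg (by norm_num : ¬ (-1:Int) > 0)]
      rw [ih idx false htail]
      norm_num
      exact (pvLastFlip_cons_noflip i (-1) (-1) idx t rfl).symm
    · -- s = -1, r = true : flip
      simp only [pvSM, if_pos (by norm_num : (-1:Int) < 0)]
      rw [ih i false htail]
      norm_num
      exact (pvLastFlip_cons_flip i (-1) 1 idx t (by norm_num)).symm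

-- A's loop over the tail equals the state machine over the diff list.
theorem pvA_loop (rest : List Int) : ∀ (pre : List Int) (prev : Int) (idx : Int) (r : Bool),
    pre = pre.dropLast ++ [prev] →
    ((PySem.List.enumerate rest (pre.length : Int)).foldl (pvStepA (pre ++ rest)) (idx, r)).1
      = pvSM (pvDiffs prev (pre.length : Int) rest) idx r := by
  induction rest with
  | nil => intro pre prev idx r _; simp [PySem.List.enumerate_nil, pvDiffs, pvSM]
  | cons v t ih =>
    intro pre prev idx r hpre
    rw [PySem.List.enumerate_cons, List.foldl_cons]
    have hlen : pre.length = pre.dropLast.length + 1 := by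
      conv_lhs => rw [hpre]
      simp
    have hne : (pre.length : Int) ≠ 0 := by omega
    have hget : (PySem.List.pyGet? (pre ++ v :: t) ((pre.length : Int) - 1)).getD 0 = prev := by
      have h2 : pre ++ v :: t = pre.dropLast ++ prev :: (v :: t) := by
        conv_lhs => rw [hpre]
        simp
      rw [h2, show (pre.length : Int) - 1 = (pre.dropLast.length : Int) by omega,
        PySem.List.pyGet?_append_length]
      rfl
    have IH' : ∀ (idx' : Int) (r' : Bool),
        ((PySem.List.enumerate t ((pre.length : Int) + 1)).foldl (pvStepA (pre ++ v :: t)) (idx', r')).1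
          = pvSM (pvDiffs v ((pre.length : Int) + 1) t) idx' r' := by
      intro idx' r'
      have h1 : (pre.length : Int) + 1 = (((pre ++ [v]).length : Int)) := by simp
      have h2 : pre ++ v :: t = (pre ++ [v]) ++ t := by simp
      rw [h1, h2]
      exact ih (pre ++ [v]) v idx' r' (by simp)
    by_cases hv : v = prev
    · have hstep : pvStepA (pre ++ v :: t) (idx, r) ((pre.length : Int), v) = (idx, r) := by
        simp only [pvStepA]
        rw [if_neg hne, hget, if_pos hv]
      rw [hstep, IH' idx r]
      simp [pvDiffs, hv]
    · rcases lt_trichotomy v prev with hlt | heq | hgt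
      · -- falling step, sign -1
        have hdiffs : pvDiffs prev (pre.length : Int) (v :: t)
            = ((pre.length : Int), -1) :: pvDiffs v ((pre.length : Int) + 1) t := by
          simp only [pvDiffs, if_neg hv, if_neg (by omega : ¬ v > prev)]
        cases r
        · have hstep : pvStepA (pre ++ v :: t) (idx, false) ((pre.length : Int), v) = (idx, false) := by
            simp only [pvStepA]
            rw [if_neg hne, hget, if_neg hv]
            norm_num
            omega
          rw [hstep, IH' idx false, hdiffs]
          simp only [pvSM]
          norm_num
        · have hstep : pvStepA (pre ++ v :: t) (idx, true) ((pre.length : Int), v)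
              = ((pre.length : Int), false) := by
            simp only [pvStepA]
            rw [if_neg hne, hget, if_neg hv]
            norm_num
            omega
          rw [hstep, IH' _ false, hdiffs]
          simp only [pvSM]
          norm_num
      · exact absurd heq hv
      · -- rising step, sign 1
        have hdiffs : pvDiffs prev (pre.length : Int) (v :: t)
            = ((pre.length : Int), 1) :: pvDiffs v ((pre.length : Int) + 1) t := by
          simp only [pvDiffs, if_neg hv, if_pos hgt]
        cases r
        · have hstep : pvStepA (pre ++ v :: t) (idx, false) ((pre.length : Int), v)
              = ((pre.length : Int), true) := by
            simp only [pvStepA]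
            rw [if_neg hne, hget, if_neg hv]
            norm_num
            omega
          rw [hstep, IH' _ true, hdiffs]
          simp only [pvSM]
          norm_num
        · have hstep : pvStepA (pre ++ v :: t) (idx, true) ((pre.length : Int), v) = (idx, true) := by
            simp only [pvStepA]
            rw [if_neg hne, hget, if_neg hv]
            norm_num
            omega
          rw [hstep, IH' idx true, hdiffs]
          simp only [pvSM]
          norm_num

-- B's comprehension over range(1, n) equals the structural diff list.
theorem pvB_diffs (rest : List Int) : ∀ (pre : List Int) (prev : Int),
    pre = pre.dropLast ++ [prev] →
    (PySem.List.pyRange (pre.length : Int) (((pre ++ rest).length : Int)) 1).filterMap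
        (pvDiffB (pre ++ rest))
      = pvDiffs prev (pre.length : Int) rest := by
  induction rest with
  | nil =>
    intro pre prev _
    rw [PySem.List.pyRange_one_eq_nil (by simp)]
    simp [pvDiffs]
  | cons v t ih =>
    intro pre prev hpre
    have hlt : (pre.length : Int) < ((pre ++ v :: t).length : Int) := by
      simp only [List.length_append, List.length_cons]
      push_cast
      omega
    rw [PySem.List.pyRange_one_cons hlt, List.filterMap_cons]
    have hlen : pre.length = pre.dropLast.length + 1 := by
      conv_lhs => rw [hpre]
      simp
    have hgetv : (PySem.List.pyGet? (pre ++ v :: t) (pre.length : Int)).getD 0 = v := by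
      rw [PySem.List.pyGet?_append_length]; rfl
    have hgetw : (PySem.List.pyGet? (pre ++ v :: t) ((pre.length : Int) - 1)).getD 0 = prev := by
      have h2 : pre ++ v :: t = pre.dropLast ++ prev :: (v :: t) := by
        conv_lhs => rw [hpre]
        simp
      rw [h2, show (pre.length : Int) - 1 = (pre.dropLast.length : Int) by omega,
        PySem.List.pyGet?_append_length]
      rfl
    have hrec : (PySem.List.pyRange ((pre.length : Int) + 1) (((pre ++ v :: t).length : Int)) 1).filterMap
          (pvDiffB (pre ++ v :: t))
        = pvDiffs v ((pre.length : Int) + 1) t := by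
      have h1 : (pre.length : Int) + 1 = (((pre ++ [v]).length : Int)) := by simp
      have h2 : pre ++ v :: t = (pre ++ [v]) ++ t := by simp
      rw [h1, h2]
      exact ih (pre ++ [v]) v (by simp)
    have hB : pvDiffB (pre ++ v :: t) (pre.length : Int)
        = if v ≠ prev then some ((pre.length : Int), if v > prev then 1 else -1) else none := by
      simp only [pvDiffB]
      rw [hgetv, hgetw]
    by_cases hv : v = prev
    · rw [hB, if_neg (by simp [hv])]
      simp only [pvDiffs, if_pos hv]
      rw [hv] at hrec ⊢
      exact hrec
    · rw [hB, if_pos hv]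
      simp only [pvDiffs, if_neg hv, List.cons.injEq]
      exact ⟨trivial, hrec⟩

theorem pvA_eq (signal : List Int) :
    find_not_rising_index signal
      = pvSM (match signal with
              | [] => []
              | v :: t => pvDiffs v 1 t) (signal.length : Int) true := by
  cases signal with
  | nil => simp [find_not_rising_index, PySem.List.enumerate_nil, pvSM]
  | cons v t =>
    unfold find_not_rising_index
    rw [PySem.List.enumerate_cons, List.foldl_cons]
    have hstep0 : pvStepA (v :: t) (((v :: t).length : Int), true) (0, v)
        = (((v :: t).length : Int), true) := by
      simp [pvStepA]
    rw [hstep0]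
    have := pvA_loop t [v] v (((v :: t).length : Int)) true rfl
    simp only [List.singleton_append, List.length_singleton, Nat.cast_one] at this
    rw [show (0 : Int) + 1 = 1 by norm_num]
    exact this

theorem pvB_eq (signal : List Int) :
    find_not_rising_index_alt signal
      = pvLastFlip (match signal with
              | [] => []
              | v :: t => pvDiffs v 1 t) 1 (signal.length : Int) := by
  cases signal with
  | nil =>
    simp [find_not_rising_index_alt, pvLastFlip, PySem.List.pyRange_one_eq_nil]
  | cons v t =>
    have hd := pvB_diffs t [v] v (by simp)
    simp only [List.singleton_append, List.length_singleton, Nat.cast_one] at hd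
    unfold find_not_rising_index_alt
    simp only [hd]
    unfold pvLastFlip
    cases hfl : ((pvDiffs v 1 t).zip ((1 : Int) :: (pvDiffs v 1 t).map (·.2))).filterMap
        (fun q => if q.1.2 ≠ q.2 then some q.1.1 else none) with
    | nil => simp
    | cons a l =>
      obtain ⟨y, hy⟩ := Option.isSome_iff_exists.mp (show ((a :: l).getLast?).isSome by simp)
      rw [hy]
      rfl

-- ===== VERDICT (by name: the statement is the Claim_ definition above) =====
theorem find_not_rising_index_spec : Claim_equal_find_not_rising_index := by
  intro signal _
  unfold Spec_find_not_rising_index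
  rw [pvA_eq, pvB_eq]
  cases signal with
  | nil => simp [pvSM, pvLastFlip]
  | cons v t =>
    exact pvSM_eq_lastFlip (pvDiffs v 1 t) _ true (pvDiffs_signs t v 1)
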